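-- pv_equiv track=rewrite | github.com/majumderarnob/BRACU_CSE220-Data_Structures | Lab assignment 1.py | removeAll
-- ===== SOURCE A (Python) =====
-- def removeAll(source, size, element):
--     i = 0
--     while i < len(source) - 1:
--         if source[i] == element:
--             for x in range(i, len(source)-1):
--                 source[x] = source[x+1]
--                 source[len(source)-1] = 0
--             i -= 1
--         i += 1
--     return source
--
-- source = [10, 2, 30, 2, 50, 2, 2, 60, 0, 0]
-- ===== SOURCE B (Python) =====
-- # One-pass removal: keep the non-matching values, zero-fill to the original length.
-- # Mutates source in place (like the original) and returns it.
-- def removeAll(source, size, element):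
--     kept = [x for x in source if x != element]
--     source[:] = kept + [0] * (len(source) - len(kept))
--     return source
-- ===== Notes on version B (the rewrite author's own statement) =====
-- stated objective: simpler
-- what changed: A repeatedly shifts the whole tail left one slot at a time (rescanning after each shift); B does one filtering pass over the list and zero-pads to the original length.
-- intended difference: When the element occurs before index n-2 and the last slot holds a value other than 0 or the element, A's shifting overwrites that last value with 0 (losing it), and when the element occurs only in the last slot A never examines it and returns the list unchanged; B removes every occurrence and keeps/zero-pads the remaining values, which is the intended 'remove all occurrences' behaviour. — e.g. on removeAll([2, 1, 3], 3, 2): A returns [1, 0, 0], B returns [1, 3, 0]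
import Mathlib
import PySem

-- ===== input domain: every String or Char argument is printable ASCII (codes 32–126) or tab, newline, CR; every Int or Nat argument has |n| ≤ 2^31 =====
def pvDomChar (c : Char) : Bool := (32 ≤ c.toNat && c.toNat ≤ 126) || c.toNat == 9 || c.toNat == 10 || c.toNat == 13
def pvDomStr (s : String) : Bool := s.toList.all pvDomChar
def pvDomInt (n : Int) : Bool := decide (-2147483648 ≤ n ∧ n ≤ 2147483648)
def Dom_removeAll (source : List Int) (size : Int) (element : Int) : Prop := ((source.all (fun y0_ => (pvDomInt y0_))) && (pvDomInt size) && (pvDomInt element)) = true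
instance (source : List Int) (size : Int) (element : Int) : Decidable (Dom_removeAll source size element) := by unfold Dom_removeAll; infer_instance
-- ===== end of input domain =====

-- B replaces A's shift-and-rescan while-loop by a single filtering pass plus
-- zero-padding (objective: simpler).  Both Pythons mutate `source` in place and
-- return it; the equivalence proved here is about the returned value.

-- ===== PORT A =====

-- inner 'for x in range(i, len(source)-1): source[x] = source[x+1]; source[len(source)-1] = 0'
-- (all indices used are provably in range, so the total forms pySetD/pyGetD are exact here)
def shiftA (s : List Int) (i : Int) : List Int :=
  (PySem.List.pyRange i ((s.length : Int) - 1) 1).foldl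
    (fun t x =>
      let t1 := PySem.List.pySetD t x (PySem.List.pyGetD t (x + 1) 0)
      PySem.List.pySetD t1 ((t1.length : Int) - 1) 0)
    s

-- the 'while i < len(source) - 1' loop; fuel only makes the port total: on every
-- input admitted by Pre_removeAll the Python loop runs at most 2*len(source)+2
-- iterations (established by the simulation lemmas below)
def loopA (element : Int) : Nat → List Int → Int → List Int
  | 0, s, _ => s
  | Nat.succ fuel, s, i =>
    if i < (s.length : Int) - 1 then
      if PySem.List.pyGetD s i 0 = element then
        loopA element fuel (shiftA s i) (i - 1 + 1)
      else
        loopA element fuel s (i + 1)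
    else s

def removeAll (source : List Int) (size : Int) (element : Int) : List Int :=
  loopA element (2 * source.length + 2) source 0

-- ===== PORT B =====

def removeAll_alt (source : List Int) (size : Int) (element : Int) : List Int :=
  let kept := source.filter (fun x => x != element)
  kept ++ List.replicate (source.length - kept.length) 0

-- ===== PRECONDITION & SPEC =====

-- Pre_ excludes exactly the inputs on which the Python A never returns: with
-- element = 0 a zero anywhere before the last two slots, or zeros in both of the
-- last two slots, makes A's shift loop re-create the zero it just examined and
-- loop forever.  On every admitted input A returns normally.
def Pre_removeAll (source : List Int) (size : Int) (element : Int) : Prop :=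
  element = 0 →
    (∀ x ∈ source.dropLast.dropLast, x ≠ 0) ∧
    ¬(source.dropLast.getLast? = some 0 ∧ source.getLast? = some 0)

instance (source : List Int) (size : Int) (element : Int) : Decidable (Pre_removeAll source size element) := by
  unfold Pre_removeAll; infer_instance

def pvWitness_removeAll : List Int × Int × Int := ([10, 2, 30, 2, 50, 2, 2, 60, 0, 0], 10, 2)

-- On lists whose last slot holds the element (A's scan stops one slot short, so it
-- stays), or where a removal happens before index n-2 while the last slot holds a
-- value other than 0 or the element (A's shifting overwrites that value with 0),
-- A returns a list that keeps, resp. loses, that last value; B removes every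
-- occurrence of the element and zero-pads, which is the intended behaviour.
def D_removeAll (source : List Int) (size : Int) (element : Int) : Prop :=
  source ≠ [] ∧
  ((element ∉ source.dropLast ∧ source.getLast? = some element ∧ element ≠ 0) ∨
   (element ∈ source.dropLast.dropLast ∧ source.getLast? ≠ some element ∧ source.getLast? ≠ some 0))

instance (source : List Int) (size : Int) (element : Int) : Decidable (D_removeAll source size element) := by
  unfold D_removeAll; infer_instance

def Spec_removeAll (source : List Int) (size : Int) (element : Int) (out : List Int) : Prop :=
  ¬ D_removeAll source size element → out = removeAll_alt source size element
instance (source : List Int) (size : Int) (element : Int) (out : List Int) : Decidable (Spec_removeAll source size element out) := by unfold Spec_removeAll; infer_instance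

def pvDiffWitness_removeAll : List Int × Int × Int := ([2, 1, 3], 3, 2)
def pvDiffWitnessOut_removeAll : (List Int) × (List Int) := ([1, 0, 0], [1, 3, 0])

-- ===== CLAIM (what is proved, stated in full; the proofs are below) =====
def Claim_unchanged_removeAll : Prop := ∀ (source : List Int) (size : Int) (element : Int), Dom_removeAll source size element → Pre_removeAll source size element → Spec_removeAll source size element (removeAll source size element)
def Claim_changed_removeAll : Prop := Dom_removeAll (pvDiffWitness_removeAll.1) (pvDiffWitness_removeAll.2.1) (pvDiffWitness_removeAll.2.2) ∧ Pre_removeAll (pvDiffWitness_removeAll.1) (pvDiffWitness_removeAll.2.1) (pvDiffWitness_removeAll.2.2) ∧ D_removeAll (pvDiffWitness_removeAll.1) (pvDiffWitness_removeAll.2.1) (pvDiffWitness_removeAll.2.2) ∧ removeAll (pvDiffWitness_removeAll.1) (pvDiffWitness_removeAll.2.1) (pvDiffWitness_removeAll.2.2) = pvDiffWitnessOut_removeAll.1 ∧ removeAll_alt (pvDiffWitness_removeAll.1) (pvDiffWitness_removeAll.2.1) (pvDiffWitness_removeAll.2.2) = pvDiffWitnessOut_removeAll.2 ∧ pvDiffWitnessOut_removeAll.1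 ≠ pvDiffWitnessOut_removeAll.2
def Claim_exact_removeAll : Prop := ∀ (source : List Int) (size : Int) (element : Int), Dom_removeAll source size element → Pre_removeAll source size element → D_removeAll source size element → removeAll source size element ≠ removeAll_alt source size element

-- ===== LEMMAS AND PROOFS =====

-- effect of one execution of A's inner shift loop on the suffix from the scan point
def tailShift : List Int → List Int
  | _ :: b :: c :: rest => (b :: c :: rest).dropLast ++ [0, 0]
  | _ :: b :: [] => [b, 0]
  | t => t

-- A's final value, computed by structural recursion on the still-unscanned suffix
def gS (el : Int) : List Int → List Int
  | [] => []
  | [a] => [a]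
  | a :: b :: rest =>
    if a = el then
      if rest = [] then (if b = el then [0, 0] else [b, 0])
      else
        let kept := ((b :: rest).dropLast).filter (fun x => x != el)
        kept ++ List.replicate (rest.length + 2 - kept.length) 0
    else a :: gS el (b :: rest)

theorem tailShift_of_len (a : Int) (u : List Int) (h : 2 ≤ u.length) :
    tailShift (a :: u) = u.dropLast ++ [0, 0] := by
  rcases u with _ | ⟨b, _ | ⟨c, v⟩⟩
  · simp at h
  · simp at h
  · rfl

theorem set_last_eq (u : List Int) (h : u ≠ []) :
    u.set (u.length - 1) 0 = u.dropLast ++ [0] := by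
  induction u with
  | nil => simp at h
  | cons a u ih =>
    cases u with
    | nil => rfl
    | cons b v =>
      have h2 : (a :: b :: v).length - 1 = ((b :: v).length - 1) + 1 := by simp
      rw [h2, List.set_cons_succ, ih (by simp), List.dropLast_cons₂]
      rfl

theorem tailShift_cons (a : Int) (u : List Int) (h : u ≠ []) :
    tailShift (a :: u) = u.headD 0 :: tailShift (u.dropLast ++ [0]) := by
  rcases u with _ | ⟨b, _ | ⟨c, _ | ⟨e, v⟩⟩⟩
  · simp at h
  · rfl
  · rfl
  · rw [tailShift_of_len _ _ (by simp)]
    have hd : (b :: c :: e :: v).dropLast ++ [0] = b :: c :: ((e :: v).dropLast ++ [0]) := by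
      simp [List.dropLast_cons₂]
    rw [hd, tailShift_of_len _ _ (by simp)]
    rw [show c :: ((e :: v).dropLast ++ [0]) = (c :: (e :: v).dropLast) ++ [0] from rfl,
      List.dropLast_concat]
    simp [List.dropLast_cons₂]

theorem getElem?_of_drop {s : List Int} {j : Nat} {a : Int} {u : List Int}
    (h : s.drop j = a :: u) : s[j]? = some a := by
  have h2 : (s.drop j)[0]? = s[j + 0]? := List.getElem?_drop
  rw [h] at h2
  simpa using h2.symm

theorem getD_of_drop (s : List Int) (j : Nat) (a : Int) (u : List Int)
    (h : s.drop j = a :: u) : s.getD j 0 = a := by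
  rw [List.getD_eq_getElem?_getD, getElem?_of_drop h]
  rfl

theorem take_succ_of_drop (s : List Int) (j : Nat) (a : Int) (u : List Int)
    (h : s.drop j = a :: u) : s.take (j + 1) = s.take j ++ [a] := by
  rw [List.take_add_one, getElem?_of_drop h]
  rfl

theorem drop_take_append (s : List Int) (j : Nat) (X : List Int)
    (ht : (s.take j).length = j) : (s.take j ++ X).drop j = X := by
  have h' := List.drop_left (l₁ := s.take j) (l₂ := X)
  rwa [ht] at h'

theorem take_take_append (s : List Int) (j : Nat) (X : List Int)
    (ht : (s.take j).length = j) : (s.take j ++ X).take j = s.take j := by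
  have h' := List.take_left (l₁ := s.take j) (l₂ := X)
  rwa [ht] at h'

theorem drop_succ_of_drop (s : List Int) (j : Nat) (a : Int) (u : List Int)
    (h : s.drop j = a :: u) : s.drop (j + 1) = u := by
  have h2 := congrArg List.tail h
  rw [List.tail_drop] at h2
  simpa using h2

theorem shiftA_step (s : List Int) (j : Nat) (h : j + 2 ≤ s.length) :
    shiftA s (j : Int) =
      shiftA ((s.set j (s.getD (j + 1) 0)).set (s.length - 1) 0) ((j + 1 : Nat) : Int) := by
  unfold shiftA
  have hr : PySem.List.pyRange (j : Int) ((s.length : Int) - 1) 1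
      = (j : Int) :: PySem.List.pyRange ((j : Int) + 1) ((s.length : Int) - 1) 1 :=
    PySem.List.pyRange_one_cons (by omega)
  rw [hr, List.foldl_cons]
  have hc1 : ((j : Int) + 1) = ((j + 1 : Nat) : Int) := by push_cast; ring
  simp only [hc1, PySem.List.pyGetD_natCast, PySem.List.pySetD_natCast, List.length_set]
  have hc2 : ((s.length : Int) - 1) = ((s.length - 1 : Nat) : Int) := by omega
  simp only [hc2, PySem.List.pySetD_natCast, List.length_set]

theorem shiftA_eq (k : Nat) : ∀ (s : List Int) (j : Nat), s.length = j + k + 2 →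
    shiftA s (j : Int) = s.take j ++ tailShift (s.drop j) := by
  induction k with
  | zero =>
    intro s j hlen
    rw [shiftA_step s j (by omega)]
    set v := s.getD (j + 1) 0 with hv
    set s' := (s.set j v).set (s.length - 1) 0 with hs'
    have hlen' : s'.length = s.length := by simp [hs']
    have hempty : shiftA s' ((j + 1 : Nat) : Int) = s' := by
      unfold shiftA
      rw [PySem.List.pyRange_one_eq_nil (by rw [hlen']; omega)]
      rfl
    rw [hempty]
    obtain ⟨a, b, hdrop⟩ : ∃ a b, s.drop j = [a, b] := by
      have hl : (s.drop j).length = 2 := by simp [List.length_drop]; omega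
      rcases hd : s.drop j with _ | ⟨a, _ | ⟨b, _ | ⟨c, w⟩⟩⟩ <;> rw [hd] at hl <;> simp at hl
      exact ⟨a, b, rfl⟩
    have hdrop1 : s.drop (j + 1) = [b] := drop_succ_of_drop s j a [b] hdrop
    have hvb : v = b := by rw [hv]; exact getD_of_drop s (j + 1) b [] hdrop1
    have ht : (s.take j).length = j := by simp [List.length_take]; omega
    have hts : tailShift (s.drop j) = [b, 0] := by rw [hdrop]; rfl
    rw [hts]
    have hsplit : s = s.take j ++ [a, b] := by
      conv_lhs => rw [← List.take_append_drop j s, hdrop]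
    rw [hs', hvb]
    conv_lhs => rw [hsplit]
    rw [List.set_append_right _ _ (by omega)]
    rw [List.set_append_right _ _ (by simp [ht])]
    simp [ht]
  | succ k ih =>
    intro s j hlen
    rw [shiftA_step s j (by omega)]
    set v := s.getD (j + 1) 0 with hv
    set s' := (s.set j v).set (s.length - 1) 0 with hs'
    have hlen' : s'.length = (j + 1) + k + 2 := by simp [hs']; omega
    rw [ih s' (j + 1) hlen']
    have hj : j < s.length := by omega
    have hu : s.drop (j + 1) ≠ [] := by
      intro hc
      have := congrArg List.length hc
      simp [List.length_drop] at this
      omega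
    have h1 : s'.take (j + 1) = s.take j ++ [v] := by
      rw [hs', List.take_set_of_le (by omega), List.take_set]
      rw [List.take_add_one, List.getElem?_eq_getElem hj]
      have ht : (s.take j).length = j := by simp [List.length_take]; omega
      simp only [Option.toList_some]
      rw [List.set_append_right _ _ (by omega)]
      simp [ht, hv, List.getD_eq_getElem?_getD]
    have h2 : s'.drop (j + 1) = (s.drop (j + 1)).dropLast ++ [0] := by
      rw [hs', List.drop_set, if_neg (by omega), List.drop_set, if_pos (by omega)]
      have hl : (s.drop (j + 1)).length = k + 2 := by simp [List.length_drop]; omega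
      have hidx : s.length - 1 - (j + 1) = (s.drop (j + 1)).length - 1 := by rw [hl]; omega
      rw [hidx, set_last_eq _ hu]
    rw [h1, h2]
    rw [List.drop_eq_getElem_cons hj, tailShift_cons _ _ hu]
    have hvh : (s.drop (j + 1)).headD 0 = v := by
      rcases hd : s.drop (j + 1) with _ | ⟨b, w⟩
      · exact absurd hd hu
      · rw [hv, getD_of_drop s (j + 1) b w hd]; rfl
    rw [hvh]
    simp

theorem loopA_exit (el : Int) (fuel : Nat) (s : List Int) (j : Nat)
    (hge : s.length ≤ j + 1) : loopA el fuel s (j : Int) = s := by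
  cases fuel with
  | zero => rfl
  | succ fuel =>
    simp only [loopA]
    rw [if_neg (by omega)]

theorem loopA_succ_lt_ne (el : Int) (fuel : Nat) (s : List Int) (j : Nat)
    (hlt : j + 1 < s.length) (hne : s.getD j 0 ≠ el) :
    loopA el (fuel + 1) s (j : Int) = loopA el fuel s ((j + 1 : Nat) : Int) := by
  simp only [loopA, PySem.List.pyGetD_natCast]
  rw [if_pos (by omega), if_neg hne]
  have hc : ((j : Int) + 1) = ((j + 1 : Nat) : Int) := by push_cast; ring
  rw [hc]

theorem loopA_succ_lt_eq (el : Int) (fuel : Nat) (s : List Int) (j : Nat)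
    (hlt : j + 1 < s.length) (heq : s.getD j 0 = el) :
    loopA el (fuel + 1) s (j : Int) = loopA el fuel (shiftA s (j : Int)) (j : Int) := by
  simp only [loopA, PySem.List.pyGetD_natCast]
  rw [if_pos (by omega), if_pos heq]
  have hc : ((j : Int) - 1 + 1) = (j : Int) := by ring
  rw [hc]

theorem loopA_scan (el : Int) (t : List Int) : ∀ (s : List Int) (j fuel : Nat),
    s.drop j = t → (∀ x ∈ t.dropLast, x ≠ el) → t.length ≤ fuel →
    loopA el fuel s (j : Int) = s := by
  induction t with
  | nil =>
    intro s j fuel hdrop _ _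
    apply loopA_exit
    have := congrArg List.length hdrop
    simp [List.length_drop] at this
    omega
  | cons a u ih =>
    intro s j fuel hdrop hne hfuel
    cases u with
    | nil =>
      apply loopA_exit
      have := congrArg List.length hdrop
      simp [List.length_drop] at this
      omega
    | cons b w =>
      have hlt : j + 1 < s.length := by
        have := congrArg List.length hdrop
        simp [List.length_drop] at this
        omega
      cases fuel with
      | zero => simp at hfuel
      | succ fuel =>
        rw [loopA_succ_lt_ne el fuel s j hlt
          (by rw [getD_of_drop s j a _ hdrop]
              exact hne a (by rw [List.dropLast_cons₂]; exact List.mem_cons_self))]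
        exact ih s (j + 1) fuel (drop_succ_of_drop s j a _ hdrop)
          (fun x hx => hne x (by rw [List.dropLast_cons₂]; exact List.mem_cons_of_mem a hx))
          (by simp at hfuel ⊢; omega)

theorem loopA_steady (el : Int) (mid : List Int) : ∀ (z : Nat) (s : List Int) (j fuel : Nat),
    el ≠ 0 → 2 ≤ z → s.drop j = mid ++ List.replicate z 0 →
    2 * mid.length + z + 1 ≤ fuel →
    loopA el fuel s (j : Int) =
      s.take j ++ mid.filter (fun x => x != el) ++ List.replicate (z + mid.count el) 0 := by
  induction mid with
  | nil =>
    intro z s j fuel hel hz hdrop hfuel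
    rw [loopA_scan el (List.replicate z 0) s j fuel (by simpa using hdrop)
      (by intro x hx hc
          have hx0 : x = 0 := List.eq_of_mem_replicate (List.mem_of_mem_dropLast hx)
          exact hel (hx0 ▸ hc.symm ▸ rfl))
      (by simp at hfuel ⊢; omega)]
    conv_lhs => rw [← List.take_append_drop j s, hdrop]
    simp
  | cons a mid' ih =>
    intro z s j fuel hel hz hdrop hfuel
    have hlens : s.length = j + (mid'.length + 1 + z) := by
      have := congrArg List.length hdrop
      simp [List.length_drop] at this
      omega
    cases fuel with
    | zero => simp at hfuel
    | succ fuel =>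
      simp only [List.length_cons] at hfuel
      by_cases ha : a = el
      · rw [loopA_succ_lt_eq el fuel s j (by omega)
          (by rw [getD_of_drop s j a _ hdrop]; exact ha)]
        rw [shiftA_eq (mid'.length + z - 1) s j (by omega), hdrop, List.cons_append]
        rw [tailShift_of_len a _ (by simp; omega)]
        have hdl : (mid' ++ List.replicate z (0 : Int)).dropLast ++ [0, 0]
            = mid' ++ List.replicate (z + 1) 0 := by
          have hz1 : List.replicate z (0 : Int) = List.replicate (z - 1) 0 ++ [0] := by
            rw [← List.replicate_succ']
            congr 1
            omega
          rw [hz1, ← List.append_assoc, List.dropLast_concat, List.append_assoc]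
          congr 1
          rw [show ([0, 0] : List Int) = List.replicate 2 0 from rfl, ← List.replicate_add]
          congr 1
          omega
        rw [hdl]
        have ht : (s.take j).length = j := by simp [List.length_take]; omega
        have hdrop₂ : (s.take j ++ (mid' ++ List.replicate (z + 1) 0)).drop j
            = mid' ++ List.replicate (z + 1) 0 := by
          exact drop_take_append s j _ ht
        rw [ih (z + 1) _ j fuel hel (by omega) hdrop₂ (by omega)]
        have htake₂ : (s.take j ++ (mid' ++ List.replicate (z + 1) 0)).take j = s.take j := by
          exact take_take_append s j _ ht
        rw [htake₂]
        have hff : (a :: mid').filter (fun x => x != el) = mid'.filter (fun x => x != el) := by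
          simp [ha]
        have hcc : (a :: mid').count el = mid'.count el + 1 := by
          rw [ha]; exact List.count_cons_self
        rw [hff, hcc, show z + (mid'.count el + 1) = z + 1 + mid'.count el by omega]
      · rw [loopA_succ_lt_ne el fuel s j (by omega)
          (by rw [getD_of_drop s j a _ hdrop]; exact ha)]
        rw [ih z s (j + 1) fuel hel hz
          (drop_succ_of_drop s j a _ hdrop) (by omega)]
        rw [take_succ_of_drop s j a _ hdrop]
        have hff : (a :: mid').filter (fun x => x != el) = a :: mid'.filter (fun x => x != el) := by
          simp [ha]
        have hcc : (a :: mid').count el = mid'.count el := List.count_cons_of_ne ha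
        rw [hff, hcc]
        simp

theorem safe_tail (el a : Int) (u : List Int) (h : Pre_removeAll (a :: u) 0 el) :
    Pre_removeAll u 0 el := by
  intro h0
  obtain ⟨h1, h2⟩ := h h0
  rcases u with _ | ⟨b, _ | ⟨c, v⟩⟩
  · exact ⟨by simp, by simp⟩
  · exact ⟨by simp, by simp⟩
  · have hdl : (b :: c :: v).dropLast = b :: (c :: v).dropLast := List.dropLast_cons₂
    have hdla : (a :: b :: c :: v).dropLast.dropLast
        = a :: (b :: c :: v).dropLast.dropLast := by
      rw [List.dropLast_cons₂, hdl, List.dropLast_cons_of_ne_nil (by simp)]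
    constructor
    · intro x hx
      apply h1
      rw [hdla]
      exact List.mem_cons_of_mem a hx
    · intro hAB
      apply h2
      obtain ⟨hA, hB⟩ := hAB
      constructor
      · rw [List.dropLast_cons₂, hdl, List.getLast?_cons_cons]
        rwa [hdl] at hA
      · rwa [List.getLast?_cons_cons]

theorem length_filter_add_count (l : List Int) (el : Int) :
    (l.filter (fun x => x != el)).length + l.count el = l.length := by
  induction l with
  | nil => rfl
  | cons x l ih =>
    by_cases hx : x = el
    · subst hx
      rw [List.filter_cons, if_neg (by simp), List.count_cons_self]
      simp only [List.length_cons]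
      omega
    · rw [List.filter_cons, if_pos (by simpa using hx), List.count_cons_of_ne hx]
      simp only [List.length_cons]
      omega

theorem loopA_main (el : Int) (t : List Int) : ∀ (s : List Int) (j fuel : Nat),
    Pre_removeAll t 0 el → s.drop j = t → 2 * t.length + 2 ≤ fuel →
    loopA el fuel s (j : Int) = s.take j ++ gS el t := by
  induction t with
  | nil =>
    intro s j fuel _ hdrop _
    have hl : s.length ≤ j := by
      have := congrArg List.length hdrop
      simp [List.length_drop] at this
      omega
    rw [loopA_exit el fuel s j (by omega)]
    simp [gS, List.take_of_length_le hl]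
  | cons a t' ih =>
    intro s j fuel hpre hdrop hfuel
    cases t' with
    | nil =>
      have hl : s.length = j + 1 := by
        have := congrArg List.length hdrop
        simp [List.length_drop] at this
        omega
      rw [loopA_exit el fuel s j (by omega)]
      conv_lhs => rw [← List.take_append_drop j s, hdrop]
      rfl
    | cons b rest =>
      have hlens : s.length = j + rest.length + 2 := by
        have := congrArg List.length hdrop
        simp [List.length_drop] at this
        omega
      have ht : (s.take j).length = j := by simp [List.length_take]; omega
      cases fuel with
      | zero => simp at hfuel
      | succ fuel =>
        simp only [List.length_cons, List.length_nil] at hfuel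
        by_cases ha : a = el
        · rw [loopA_succ_lt_eq el fuel s j (by omega)
            (by rw [getD_of_drop s j a _ hdrop]; exact ha)]
          rw [shiftA_eq rest.length s j (by omega), hdrop]
          cases rest with
          | nil =>
            rw [show tailShift [a, b] = [b, 0] from rfl]
            have hdrop₂ : (s.take j ++ [b, 0]).drop j = [b, 0] := by
              exact drop_take_append s j _ ht
            by_cases hb : b = el
            · have hel0 : el ≠ 0 := by
                intro hc
                obtain ⟨_, h2⟩ := hpre hc
                apply h2
                constructor
                · simpa using ha.trans hc
                · simpa using hb.trans hc
              cases fuel with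
              | zero => omega
              | succ fuel2 =>
                rw [loopA_succ_lt_eq el fuel2 _ j
                  (by simp [ht])
                  (by rw [getD_of_drop _ j b _ hdrop₂]; exact hb)]
                rw [shiftA_eq 0 _ j (by simp [ht]), hdrop₂]
                rw [show tailShift [b, 0] = [0, 0] from rfl]
                have htake₂ : (s.take j ++ [b, 0]).take j = s.take j := by
                  exact take_take_append s j _ ht
                rw [htake₂]
                have hdrop₃ : (s.take j ++ [0, 0]).drop j = [0, 0] := by
                  exact drop_take_append s j _ ht
                rw [loopA_scan el [0, 0] _ j fuel2 hdrop₃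
                  (by intro x hx hc
                      simp at hx
                      exact hel0 (by rw [← hc]; exact hx))
                  (by simp; omega)]
                simp [gS, ha, hb]
            · rw [loopA_scan el [b, 0] _ j fuel hdrop₂
                (by intro x hx hc
                    simp at hx
                    exact hb (by rw [← hx]; exact hc))
                (by simp; omega)]
              simp [gS, ha, hb]
          | cons c rest' =>
            have hel0 : el ≠ 0 := by
              intro hc
              obtain ⟨h1, _⟩ := hpre hc
              apply h1 a ?_ (by rw [ha, hc])
              rw [List.dropLast_cons₂]
              rw [show (b :: c :: rest').dropLast = b :: (c :: rest').dropLast from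
                List.dropLast_cons₂]
              rw [List.dropLast_cons₂]
              exact List.mem_cons_self
            rw [tailShift_of_len a _ (by simp)]
            rw [show ([0, 0] : List Int) = List.replicate 2 0 from rfl]
            have hdrop₂ : (s.take j ++ ((b :: c :: rest').dropLast ++ List.replicate 2 0)).drop j
                = (b :: c :: rest').dropLast ++ List.replicate 2 0 := by
              exact drop_take_append s j _ ht
            rw [loopA_steady el ((b :: c :: rest').dropLast) 2 _ j fuel hel0 (by omega) hdrop₂
              (by simp only [List.length_dropLast, List.length_cons] at hfuel ⊢; omega)]
            have htake₂ : (s.take j ++ ((b :: c :: rest').dropLast ++ List.replicate 2 0)).take j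
                = s.take j := by
              exact take_take_append s j _ ht
            rw [htake₂]
            have hcnt := length_filter_add_count ((b :: c :: rest').dropLast) el
            have hml : ((b :: c :: rest').dropLast).length = rest'.length + 1 := by simp
            simp only [gS, if_pos ha, if_neg (by simp : ¬(c :: rest' = []))]
            rw [List.append_assoc]
            congr 2
            rw [show (c :: rest').length + 2
                  - (((b :: c :: rest').dropLast).filter (fun x => x != el)).length
                = 2 + ((b :: c :: rest').dropLast).count el by
              simp only [List.length_cons]
              omega]
        · rw [loopA_succ_lt_ne el fuel s j (by omega)
            (by rw [getD_of_drop s j a _ hdrop]; exact ha)]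
          rw [ih s (j + 1) fuel (safe_tail el a _ hpre)
            (drop_succ_of_drop s j a _ hdrop) (by simp; omega)]
          rw [take_succ_of_drop s j a _ hdrop]
          simp [gS, ha]

theorem gS_cons (el a b : Int) (rest : List Int) (ha : ¬ a = el) :
    gS el (a :: b :: rest) = a :: gS el (b :: rest) := by
  simp [gS, ha]

theorem gS_head (el b c : Int) (rest' : List Int) :
    gS el (el :: b :: c :: rest') =
      ((b :: c :: rest').dropLast).filter (fun x => x != el)
        ++ List.replicate ((c :: rest').length + 2
            - (((b :: c :: rest').dropLast).filter (fun x => x != el)).length) 0 := by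
  simp [gS]

theorem filt_of_not_mem (l : List Int) (el : Int) (h : el ∉ l) : l.filter (fun x => x != el) = l :=
  List.filter_eq_self.mpr (fun a ha => by simp [bne_iff_ne]; rintro rfl; exact h ha)

theorem filt_lt (l : List Int) (el : Int) (h : el ∈ l) : (l.filter (fun x => x != el)).length < l.length := by
  apply List.length_filter_lt_length_iff_exists.mpr
  exact ⟨el, h, by simp⟩

theorem alt_cons (el size a : Int) (u : List Int) (ha : ¬ a = el) :
    removeAll_alt (a :: u) size el = a :: removeAll_alt u size el := by
  simp only [removeAll_alt]
  rw [List.filter_cons, if_pos (by simpa using ha)]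
  simp only [List.cons_append, List.length_cons, Nat.succ_sub_succ]

theorem D_cons (el size a : Int) (u : List Int) (ha : ¬ a = el) (hu : u ≠ []) :
    D_removeAll (a :: u) size el ↔ D_removeAll u size el := by
  obtain ⟨b, v, rfl⟩ := List.exists_cons_of_ne_nil hu
  unfold D_removeAll
  rw [List.dropLast_cons₂, List.getLast?_cons_cons]
  constructor
  · rintro ⟨-, h | h⟩
    · exact ⟨by simp, Or.inl ⟨fun hm => h.1 (List.mem_cons_of_mem a hm), h.2⟩⟩
    · refine ⟨by simp, Or.inr ⟨?_, h.2⟩⟩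
      rcases v with _ | ⟨c, w⟩
      · simp at h
      · rw [List.dropLast_cons_of_ne_nil (by simp)] at h
        rcases List.mem_cons.mp h.1 with hc | hc
        · exact absurd hc.symm ha
        · exact hc
  · rintro ⟨-, h | h⟩
    · refine ⟨by simp, Or.inl ⟨?_, h.2⟩⟩
      intro hm
      rcases List.mem_cons.mp hm with hc | hc
      · exact ha hc.symm
      · exact h.1 hc
    · refine ⟨by simp, Or.inr ⟨?_, h.2⟩⟩
      rcases v with _ | ⟨c, w⟩
      · simp at h
      · rw [List.dropLast_cons_of_ne_nil (by simp)]
        exact List.mem_cons_of_mem a h.1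

theorem gS_alt_head (el size b c : Int) (rest' : List Int)
    (hlast : (b :: c :: rest').getLast? = some el ∨ (b :: c :: rest').getLast? = some 0) :
    gS el (el :: b :: c :: rest') = removeAll_alt (el :: b :: c :: rest') size el := by
  set u := b :: c :: rest' with hu
  have hune : u ≠ [] := by simp [hu]
  set last := u.getLast hune with hlastdef
  have hgl2 : u.getLast? = some last := List.getLast?_eq_some_getLast hune
  have hsplit : u = u.dropLast ++ [last] := (List.dropLast_concat_getLast hune).symm
  have hFu : u.filter (fun x => x != el)
      = u.dropLast.filter (fun x => x != el)
        ++ (if last = el then [] else [last]) := by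
    conv_lhs => rw [hsplit]
    rw [List.filter_append, List.filter_singleton]
    by_cases hle : last = el
    · simp [hle]
    · simp [hle, Bool.cond_eq_if, bne_iff_ne]
  have hklen : (u.dropLast.filter (fun x => x != el)).length ≤ u.length - 1 := by
    have h1 := List.length_filter_le (fun x => x != el) u.dropLast
    simpa using h1
  have hulen : u.length = rest'.length + 2 := by simp [hu]
  rw [gS_head]
  simp only [removeAll_alt]
  rw [List.filter_cons, if_neg (by simp)]
  rw [hFu]
  rcases hlast with hle | hl0
  · have hq : last = el := Option.some.inj (hgl2.symm.trans hle)
    rw [if_pos hq]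
    simp only [List.append_nil, List.length_cons]
    congr 2
  · by_cases hle : last = el
    · rw [if_pos hle]
      simp only [List.append_nil, List.length_cons]
      congr 2
    · have hl0' : last = 0 := Option.some.inj (hgl2.symm.trans hl0)
      rw [if_neg hle, hl0']
      simp only [List.append_assoc, List.singleton_append, List.length_append,
        List.length_cons, List.length_nil]
      rw [← List.replicate_succ, ← hu]
      congr 2
      omega

theorem gS_alt (el size : Int) : ∀ source : List Int,
    ¬ D_removeAll source size el → gS el source = removeAll_alt source size el := by
  intro source
  induction source with
  | nil => intro _; rfl
  | cons a u ih =>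
    intro hD
    rcases u with _ | ⟨b, _ | ⟨c, rest'⟩⟩
    · -- [a]
      by_cases ha : a = el
      · have hel0 : el = 0 := by
          by_contra h0
          exact hD ⟨by simp, Or.inl ⟨by simp, by simp [ha], h0⟩⟩
        subst ha
        simp [gS, removeAll_alt, hel0]
      · simp [gS, removeAll_alt, filt_of_not_mem [a] el (by simp only [List.mem_singleton]; intro h; exact ha h.symm)]
    · -- [a, b]
      by_cases ha : a = el
      · by_cases hb : b = el
        · rw [ha, hb]
          simp [gS, removeAll_alt]
        · rw [ha]
          simp [gS, removeAll_alt, hb]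
      · -- a ≠ el, tail [b] nonempty
        rw [gS_cons el a b [] ha, alt_cons el size a [b] ha]
        rw [ih (fun h => hD ((D_cons el size a [b] ha (by simp)).mpr h))]
    · -- a :: b :: c :: rest'
      by_cases ha : a = el
      · have hlast : (b :: c :: rest').getLast? = some el ∨ (b :: c :: rest').getLast? = some 0 := by
          by_contra hc
          push_neg at hc
          apply hD
          refine ⟨by simp, Or.inr ⟨?_, ?_, ?_⟩⟩
          · rw [ha, show (el :: b :: c :: rest').dropLast = el :: (b :: c :: rest').dropLast from
              List.dropLast_cons₂, List.dropLast_cons_of_ne_nil (by simp)]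
            exact List.mem_cons_self
          · rw [List.getLast?_cons_cons]
            exact hc.1
          · rw [List.getLast?_cons_cons]
            exact hc.2
        rw [ha]
        exact gS_alt_head el size b c rest' hlast
      · rw [gS_cons el a b _ ha, alt_cons el size a _ ha]
        rw [ih (fun h => hD ((D_cons el size a _ ha (by simp)).mpr h))]

theorem gS_not_mem (el : Int) : ∀ source : List Int, el ∉ source.dropLast → gS el source = source := by
  intro source
  induction source with
  | nil => intro _; rfl
  | cons a u ih =>
    intro h
    cases u with
    | nil => rfl
    | cons b rest =>
      rw [List.dropLast_cons₂] at h
      have ha : a ≠ el := fun hc => h (hc ▸ List.mem_cons_self)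
      rw [gS_cons el a b rest ha, ih (fun hm => h (List.mem_cons_of_mem a hm))]

theorem gS_mem (el : Int) : ∀ source : List Int, el ∈ source.dropLast.dropLast →
    gS el source = (source.dropLast).filter (fun x => x != el)
      ++ List.replicate (source.length - ((source.dropLast).filter (fun x => x != el)).length) 0 := by
  intro source
  induction source with
  | nil => intro h; simp at h
  | cons a u ih =>
    intro h
    rcases u with _ | ⟨b, _ | ⟨c, rest'⟩⟩
    · simp at h
    · simp at h
    · by_cases ha : a = el
      · subst ha
        rw [gS_head]
        rw [show (a :: b :: c :: rest').dropLast = a :: (b :: c :: rest').dropLast from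
          List.dropLast_cons₂]
        rw [List.filter_cons, if_neg (by simp)]
        congr 2
      · rw [gS_cons el a b _ ha]
        rw [List.dropLast_cons₂] at h ⊢
        rw [List.dropLast_cons_of_ne_nil (by simp : (b :: c :: rest').dropLast ≠ [])] at h
        have hm : el ∈ (b :: c :: rest').dropLast.dropLast := by
          rcases List.mem_cons.mp h with hc | hc
          · exact absurd hc.symm ha
          · exact hc
        rw [ih hm]
        rw [List.filter_cons, if_pos (by simpa using ha)]
        have hlen : ((b :: c :: rest').dropLast.filter (fun x => x != el)).length
            ≤ rest'.length + 1 := by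
          have h1 := List.length_filter_le (fun x => x != el) ((b :: c :: rest').dropLast)
          have h2 : ((b :: c :: rest').dropLast).length = rest'.length + 1 := by simp
          omega
        simp only [List.cons_append, List.length_cons]
        congr 3
        omega

-- A keeps the element sitting in the last slot; B's result ends in a pad zero there.
theorem gS_ne_alt_last (el size : Int) (source : List Int)
    (hnm : el ∉ source.dropLast) (hgl : source.getLast? = some el) (h0 : el ≠ 0) :
    gS el source ≠ removeAll_alt source size el := by
  intro heq
  rw [gS_not_mem el source hnm] at heq
  have hne : source ≠ [] := by rintro rfl; simp at hgl
  have hmem : el ∈ source := by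
    have hg := List.getLast?_eq_some_getLast hne
    rw [hgl] at hg
    rw [Option.some.inj hg]
    exact List.getLast_mem hne
  have hlt : (source.filter (fun x => x != el)).length < source.length :=
    filt_lt source el hmem
  obtain ⟨m, hm⟩ : ∃ m, source.length - (source.filter (fun x => x != el)).length = m + 1 :=
    ⟨source.length - (source.filter (fun x => x != el)).length - 1, by omega⟩
  have hz : source.getLast? = some 0 := by
    rw [heq]
    simp only [removeAll_alt, hm]
    rw [List.getLast?_append]
    simp [List.getLast?_replicate]
  rw [hgl] at hz
  exact h0 (Option.some.inj hz)

-- A zero-fills over the original last value; B keeps it right after the survivors.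
theorem gS_ne_alt_mid (el size : Int) (source : List Int)
    (hm : el ∈ source.dropLast.dropLast)
    (hgl1 : source.getLast? ≠ some el) (hgl2 : source.getLast? ≠ some 0) :
    gS el source ≠ removeAll_alt source size el := by
  intro heq
  have hne : source ≠ [] := by rintro rfl; simp at hm
  set last := source.getLast hne with hlastdef
  have hgl : source.getLast? = some last := List.getLast?_eq_some_getLast hne
  have hlel : last ≠ el := fun hc => hgl1 (by rw [hgl, hc])
  have hl0 : last ≠ 0 := fun hc => hgl2 (by rw [hgl, hc])
  have hsplit : source = source.dropLast ++ [last] := (List.dropLast_concat_getLast hne).symm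
  have hmdl : el ∈ source.dropLast := List.mem_of_mem_dropLast hm
  set F := source.dropLast.filter (fun x => x != el) with hF
  have hklt : F.length < source.dropLast.length := filt_lt _ el hmdl
  have hlen : source.dropLast.length = source.length - 1 := by simp
  have hFs : source.filter (fun x => x != el) = F ++ [last] := by
    conv_lhs => rw [hsplit]
    rw [List.filter_append, List.filter_singleton]
    simp [hlel, Bool.cond_eq_if, bne_iff_ne, ← hF]
  have h1 : (gS el source)[F.length]? = some 0 := by
    rw [gS_mem el source hm, ← hF]
    rw [List.getElem?_append_right (le_refl _)]
    rw [Nat.sub_self]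
    rw [List.getElem?_replicate]
    rw [if_pos (by omega)]
  have h2 : (removeAll_alt source size el)[F.length]? = some last := by
    simp only [removeAll_alt, hFs]
    rw [List.getElem?_append_left (by simp)]
    rw [List.getElem?_append_right (le_refl _)]
    simp
  rw [heq, h2] at h1
  exact hl0 (Option.some.inj h1)

theorem removeAll_eq_gS (source : List Int) (size element : Int)
    (hpre : Pre_removeAll source size element) :
    removeAll source size element = gS element source := by
  unfold removeAll
  have h := loopA_main element source source 0 (2 * source.length + 2) hpre rfl (by omega)
  simp only [Nat.cast_zero] at h
  rw [h, List.take_zero, List.nil_append]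

-- ===== VERDICT (by name: the statement is the Claim_ definition above) =====
theorem removeAll_spec : Claim_unchanged_removeAll := by
  intro source size element _ hpre hD
  rw [removeAll_eq_gS source size element hpre, gS_alt element size source hD]

theorem removeAll_changed : Claim_changed_removeAll := by
  unfold Claim_changed_removeAll; decide

theorem removeAll_tight : Claim_exact_removeAll := by
  intro source size element _ hpre hD
  rw [removeAll_eq_gS source size element hpre]
  rcases hD with ⟨hne, ⟨h1, h2, h3⟩ | ⟨h1, h2, h3⟩⟩
  · exact gS_ne_alt_last element size source h1 h2 h3
  · exact gS_ne_alt_mid element size source h1 h2 h3
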